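-- pv_equiv track=rewrite | github.com/leejinwon012/Algorithm_practice | 프로그래머스/0/181854. 배열의 길이에 따라 다른 연산하기/배열의 길이에 따라 다른 연산하기.py | solution
-- ===== SOURCE A (Python) =====
-- def solution(arr, n):
--     for index, i in enumerate(arr):
--         if len(arr) % 2 != 0:
--             if index % 2 == 0:
--                 arr[index] += n
--         else:
--             if index % 2 != 0:
--                 arr[index] += n
--     return arr
-- ===== SOURCE B (Python) =====
-- def solution(arr, n):
--     start = 0 if len(arr) % 2 != 0 else 1
--     for i in range(start, len(arr), 2):
--         arr[i] += n
--     return arr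
-- ===== Notes on version B (the rewrite author's own statement) =====
-- stated objective: faster
-- what changed: B computes the start index from the length parity once and strides directly over only the indices to modify (range(start, len, 2)), instead of A's full scan with a per-element parity test nested under a per-iteration length-parity test; B mutates arr in place like A.
import Mathlib
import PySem

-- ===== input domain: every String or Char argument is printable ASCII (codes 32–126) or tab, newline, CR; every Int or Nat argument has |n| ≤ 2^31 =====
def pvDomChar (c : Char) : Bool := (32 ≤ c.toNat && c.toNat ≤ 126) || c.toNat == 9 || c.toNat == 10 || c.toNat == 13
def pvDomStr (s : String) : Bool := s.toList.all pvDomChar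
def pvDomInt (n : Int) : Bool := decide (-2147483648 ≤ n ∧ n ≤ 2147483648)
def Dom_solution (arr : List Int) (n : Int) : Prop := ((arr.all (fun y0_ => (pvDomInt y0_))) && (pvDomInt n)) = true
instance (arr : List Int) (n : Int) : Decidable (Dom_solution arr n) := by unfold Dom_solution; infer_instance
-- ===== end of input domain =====

-- B strides directly over only the indices to modify instead of testing parity per element;
-- both A and B mutate arr in place in Python — the theorem is about the returned value.

-- ===== PORT A =====
-- 'arr[index] += n': index from enumerate is nonnegative and < len(arr), so List.set/getD
-- with .toNat is exact here; 'i' from enumerate is bound but unused, as in the Python.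
def solution (arr : List Int) (n : Int) : List Int :=
  (PySem.List.enumerate arr 0).foldl
    (fun a p =>
      if ¬ ((arr.length : Int) % 2 = 0) then
        (if p.1 % 2 = 0 then a.set p.1.toNat (a.getD p.1.toNat 0 + n) else a)
      else
        (if ¬ (p.1 % 2 = 0) then a.set p.1.toNat (a.getD p.1.toNat 0 + n) else a))
    arr

-- ===== PORT B =====
def solution_alt (arr : List Int) (n : Int) : List Int :=
  let start : Int := if ¬ ((arr.length : Int) % 2 = 0) then 0 else 1
  (PySem.List.pyRange start arr.length 2).foldl
    (fun a i => a.set i.toNat (a.getD i.toNat 0 + n)) arr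

-- ===== PRECONDITION & SPEC =====
def Spec_solution (arr : List Int) (n : Int) (out : List Int) : Prop := out = solution_alt arr n
instance (arr : List Int) (n : Int) (out : List Int) : Decidable (Spec_solution arr n out) := by unfold Spec_solution; infer_instance

-- ===== CLAIM (what is proved, stated in full; the proofs are below) =====
def Claim_equal_solution : Prop := ∀ (arr : List Int) (n : Int), Dom_solution arr n → Spec_solution arr n (solution arr n)

-- ===== LEMMAS AND PROOFS =====

-- Core invariant: a fold that conditionally adds n at index i (all indices in range)
-- preserves the length and adds n·(multiplicity of j among the selected indices) at slot j.
theorem fold_set_spec (n : Int) (p : Int → Bool) :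
    ∀ (L : List Int) (a : List Int),
      (∀ i ∈ L, 0 ≤ i ∧ i < (a.length : Int)) →
      ((L.foldl (fun a i => if p i then a.set i.toNat (a.getD i.toNat 0 + n) else a) a).length = a.length ∧
       ∀ j : Nat,
        (L.foldl (fun a i => if p i then a.set i.toNat (a.getD i.toNat 0 + n) else a) a).getD j 0
          = a.getD j 0 + n * (((L.filter p).count (j : Int) : Int))) := by
  intro L
  induction L with
  | nil => intro a _; simp
  | cons i L ih =>
    intro a h
    obtain ⟨hi0, hilt⟩ := h i (by simp)
    have hlen' : (if p i then a.set i.toNat (a.getD i.toNat 0 + n) else a).length = a.length := by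
      split <;> simp
    have h' : ∀ x ∈ L, 0 ≤ x ∧ x < ((if p i then a.set i.toNat (a.getD i.toNat 0 + n) else a).length : Int) := by
      intro x hx; rw [hlen']; exact h x (List.mem_cons_of_mem _ hx)
    obtain ⟨ihl, ihg⟩ := ih _ h'
    refine ⟨?_, ?_⟩
    · rw [List.foldl_cons, ihl, hlen']
    · intro j
      rw [List.foldl_cons, ihg j]
      have hjd : (if p i then a.set i.toNat (a.getD i.toNat 0 + n) else a).getD j 0
          = a.getD j 0 + (if p i ∧ i = (j : Int) then n else 0) := by
        by_cases hp : p i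
        · rw [if_pos hp]
          by_cases hij : i = (j : Int)
          · have hjn : i.toNat = j := by omega
            have hjlt : j < a.length := by omega
            rw [hjn, if_pos ⟨hp, hij⟩]
            simp [List.getD_eq_getElem?_getD, hjlt]
          · have hjn : i.toNat ≠ j := by omega
            rw [if_neg (by tauto)]
            simp [List.getD_eq_getElem?_getD, hjn]
        · rw [if_neg hp, if_neg (by tauto)]
          ring
      rw [hjd]
      have hcnt : (((i :: L).filter p).count ((j : Nat) : Int) : Int)
          = ((L.filter p).count ((j : Nat) : Int) : Int) + (if p i ∧ i = (j : Int) then 1 else 0) := by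
        rw [List.filter_cons]
        by_cases hp : p i
        · rw [if_pos hp, List.count_cons]
          by_cases hij : i = (j : Int)
          · rw [if_pos (show (i == (j : Int)) = true by simp [hij]), if_pos ⟨hp, hij⟩]
            push_cast; ring
          · rw [if_neg (show ¬ (i == (j : Int)) = true by simp [hij]),
              if_neg (fun hc => hij hc.2)]
            push_cast; ring
        · rw [if_neg hp, if_neg (fun hc => hp hc.1)]
          ring
      rw [hcnt]
      by_cases hc : p i ∧ i = (j : Int)
      · rw [if_pos hc, if_pos hc]; ring
      · rw [if_neg hc, if_neg hc]; ring

theorem nodup_pyRange_two (a b : Int) : (PySem.List.pyRange a b 2).Nodup := by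
  rw [PySem.List.pyRange_of_pos a b (by norm_num)]
  exact (List.nodup_range).map (fun x y hxy => by omega)

theorem solution_eq_fold (arr : List Int) (n : Int) :
    solution arr n
      = (PySem.List.pyRange 0 (arr.length : Int) 1).foldl
          (fun a i =>
            if (if ¬ ((arr.length : Int) % 2 = 0) then i % 2 = 0 else ¬ (i % 2 = 0) : Bool)
            then a.set i.toNat (a.getD i.toNat 0 + n) else a) arr := by
  unfold solution
  have hm : (PySem.List.enumerate arr 0).map (fun q => q.1) = PySem.List.pyRange 0 (arr.length : Int) 1 := by
    rw [PySem.List.map_fst_enumerate]; norm_num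
  rw [← hm, List.foldl_map]
  congr 1
  funext a q
  by_cases hpar : (arr.length : Int) % 2 = 0 <;> by_cases hq : q.1 % 2 = 0 <;>
    simp [hpar, hq]

-- ===== VERDICT (by name: the statement is the Claim_ definition above) =====
theorem solution_spec : Claim_equal_solution := by
  intro arr n _
  unfold Spec_solution solution_alt
  rw [solution_eq_fold]
  set p : Int → Bool :=
    fun i => (if ¬ ((arr.length : Int) % 2 = 0) then i % 2 = 0 else ¬ (i % 2 = 0) : Bool) with hp
  set start : Int := if ¬ ((arr.length : Int) % 2 = 0) then 0 else 1 with hs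
  have hA := fold_set_spec n p (PySem.List.pyRange 0 (arr.length : Int) 1) arr
    (by intro i hi; rw [PySem.List.mem_pyRange_one] at hi; exact hi)
  have hB := fold_set_spec n (fun _ => true) (PySem.List.pyRange start (arr.length : Int) 2) arr
    (by intro i hi
        rw [PySem.List.mem_pyRange_iff_of_pos (by norm_num)] at hi
        constructor
        · have : (0:Int) ≤ start := by rw [hs]; split <;> norm_num
          omega
        · exact hi.2.1)
  obtain ⟨hAl, hAg⟩ := hA
  obtain ⟨hBl, hBg⟩ := hB
  have hBg' : ∀ j : Nat,
      ((PySem.List.pyRange start (arr.length : Int) 2).foldl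
        (fun a i => a.set i.toNat (a.getD i.toNat 0 + n)) arr).getD j 0
      = arr.getD j 0 + n * (((PySem.List.pyRange start (arr.length : Int) 2).count (j : Int) : Int)) := by
    intro j; have := hBg j; simpa using this
  have hBl' : ((PySem.List.pyRange start (arr.length : Int) 2).foldl
        (fun a i => a.set i.toNat (a.getD i.toNat 0 + n)) arr).length = arr.length := by
    simpa using hBl
  apply List.ext_getElem (by rw [hAl, hBl'])
  intro j h1 h2
  have hjlen : j < arr.length := by rwa [hAl] at h1
  have hgA := hAg j
  have hgB := hBg' j
  rw [List.getD_eq_getElem _ _ h1] at hgA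
  rw [List.getD_eq_getElem _ _ h2] at hgB
  rw [hgA, hgB]
  -- counts agree: both sides select exactly the in-range indices of the right parity
  have hmem : ((j : Int) ∈ (PySem.List.pyRange 0 (arr.length : Int) 1).filter p)
      ↔ ((j : Int) ∈ PySem.List.pyRange start (arr.length : Int) 2) := by
    rw [List.mem_filter, PySem.List.mem_pyRange_one,
      PySem.List.mem_pyRange_iff_of_pos (by norm_num)]
    by_cases hpar : (arr.length : Int) % 2 = 0 <;>
      simp only [hp, hs, hpar] <;> simp <;> omega
  have hndA : ((PySem.List.pyRange 0 (arr.length : Int) 1).filter p).Nodup :=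
    (PySem.List.nodup_pyRange_one 0 _).filter _
  have hndB : (PySem.List.pyRange start (arr.length : Int) 2).Nodup := nodup_pyRange_two _ _
  have hcnt : ((PySem.List.pyRange 0 (arr.length : Int) 1).filter p).count ((j : Nat) : Int)
      = (PySem.List.pyRange start (arr.length : Int) 2).count ((j : Nat) : Int) := by
    by_cases hm : (j : Int) ∈ (PySem.List.pyRange 0 (arr.length : Int) 1).filter p
    · rw [List.count_eq_one_of_mem hndA hm, List.count_eq_one_of_mem hndB (hmem.mp hm)]
    · rw [List.count_eq_zero_of_not_mem hm,
        List.count_eq_zero_of_not_mem (fun h => hm (hmem.mpr h))]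
  rw [hcnt]
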